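-- pv_equiv track=rewrite | github.com/wawzysys/Algorithm | 2024bishi/5.20携程/3.py | solve
-- ===== SOURCE A (Python) =====
-- def solve(x, p):
--     # 提取奇数位数字组成新数
--     odd = [digit for digit in str(x) if int(digit) % 2 != 0]
--     if not odd:
--         new_number = 0
--     else:
--         new_number = int(''.join(odd))
--
--     # 计算新数对p取模的结果
--     result = new_number % p
--     return result
-- ===== SOURCE B (Python) =====
-- def solve(x, p):
--     # Collect the odd digits arithmetically, least-significant first, prepending
--     # each to build the digit string back-to-front; one int() at the end.
--     s = ''
--     n = x
--     while n > 0: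
--         d = n % 10
--         if d % 2 != 0:
--             s = str(d) + s
--         n //= 10
--     new_number = int(s) if s else 0
--     return new_number % p
-- ===== Notes on version B (the rewrite author's own statement) =====
-- stated objective: alternative
-- what changed: B extracts the odd digits arithmetically with divmod from the least-significant end and builds the digit string back-to-front, instead of filtering the characters of str(x) and joining them; one int() at the end as before.
import Mathlib
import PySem

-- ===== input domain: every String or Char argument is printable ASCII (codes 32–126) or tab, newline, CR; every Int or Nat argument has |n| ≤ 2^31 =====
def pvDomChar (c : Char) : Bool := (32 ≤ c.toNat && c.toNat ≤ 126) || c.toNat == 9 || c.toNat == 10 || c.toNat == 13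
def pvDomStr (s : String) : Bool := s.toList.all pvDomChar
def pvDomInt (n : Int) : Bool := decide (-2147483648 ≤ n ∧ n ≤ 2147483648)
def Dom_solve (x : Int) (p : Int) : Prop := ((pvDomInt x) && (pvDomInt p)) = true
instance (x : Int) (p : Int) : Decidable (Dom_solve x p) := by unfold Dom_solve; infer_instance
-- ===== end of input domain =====

-- B extracts the odd digits arithmetically (divmod, least-significant first) and builds the
-- digit string back-to-front with one int() at the end, instead of filtering the characters
-- of str(x) and joining; an alternative of the same cost.


-- ===== PORT A =====
-- odd = [digit for digit in str(x) if int(digit) % 2 != 0]   (the string is carried as its char list;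
-- int(digit) on the 1-char string digit is PySem.Int.ofStr?, totalized with .getD 0 — exact under Pre_,
-- where every character of str(x) is a digit and int() cannot raise)
def solve (x : Int) (p : Int) : Int :=
  let odd : List Char := (PySem.Int.toStr x).toList.filter
    (fun c => decide (PySem.Int.mod ((PySem.Int.ofStr? (String.ofList [c])).getD 0) 2 ≠ 0))
  -- new_number = 0 if odd is empty else int(''.join(odd))
  let newNumber : Int := if odd = [] then 0 else (PySem.Int.ofStr? (String.ofList odd)).getD 0
  PySem.Int.mod newNumber p

-- ===== PORT B =====
-- the while loop of Source B: n > 0 → d = n % 10; if d odd, s = str(d) + s; n //= 10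
-- (the string s is carried as its char list; str(d) + s is PySem.Int.toChars d ++ s, exact by toList_toStr)
def solveAltLoop (n : Int) (s : List Char) : List Char :=
  if _h : 0 < n then
    let d := PySem.Int.mod n 10
    let s' := if PySem.Int.mod d 2 ≠ 0 then PySem.Int.toChars d ++ s else s
    solveAltLoop (PySem.Int.floordiv n 10) s'
  else s
termination_by n.toNat
decreasing_by
  rw [PySem.Int.floordiv_eq_ediv_of_pos (by omega : (0:Int) < 10)]
  omega

def solve_alt (x : Int) (p : Int) : Int :=
  let s := solveAltLoop x []
  -- new_number = int(s) if s else 0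
  let newNumber : Int := if s = [] then 0 else (PySem.Int.ofStr? (String.ofList s)).getD 0
  PySem.Int.mod newNumber p

-- ===== PRECONDITION & SPEC =====
-- Pre_ excludes exactly the inputs where A raises: x < 0 (str(x) starts with '-' and int('-')
-- raises ValueError) and p = 0 (the final % raises ZeroDivisionError).
def Pre_solve (x : Int) (p : Int) : Prop := 0 ≤ x ∧ p ≠ 0
instance (x : Int) (p : Int) : Decidable (Pre_solve x p) := by unfold Pre_solve; infer_instance
def pvWitness_solve : Int × Int := (135, 7)

def Spec_solve (x : Int) (p : Int) (out : Int) : Prop := out = solve_alt x p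
instance (x : Int) (p : Int) (out : Int) : Decidable (Spec_solve x p out) := by unfold Spec_solve; infer_instance

-- ===== CLAIM (what is proved, stated in full; the proofs are below) =====
def Claim_equal_solve : Prop := ∀ (x : Int) (p : Int), Dom_solve x p → Pre_solve x p → Spec_solve x p (solve x p)

-- ===== LEMMAS AND PROOFS =====

-- A's per-character filter test, named for the proofs below
def oddCharTest (c : Char) : Bool :=
  decide (PySem.Int.mod ((PySem.Int.ofStr? (String.ofList [c])).getD 0) 2 ≠ 0)

lemma toDigits_lt_ten {n : Nat} (h : n < 10) : Nat.toDigits 10 n = [Nat.digitChar n] := by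
  interval_cases n <;> rfl

lemma oddCharTest_digitChar {d : Nat} (h : d < 10) :
    oddCharTest (Nat.digitChar d) = decide (d % 2 = 1) := by
  interval_cases d <;> rfl

lemma toChars_small {d : Int} (h0 : 0 ≤ d) (h1 : d < 10) :
    PySem.Int.toChars d = [Nat.digitChar d.toNat] := by
  rw [PySem.Int.toChars, if_neg (by omega)]
  exact toDigits_lt_ten (by omega)

-- filter of the digit string splits at the last digit (for n < 10 the n/10 part is toDigits 10 0
-- = ['0'], which the filter drops, so no case distinction is needed by the caller)
lemma filter_toDigits_step (n : Nat) (h : 0 < n) :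
    (Nat.toDigits 10 n).filter oddCharTest =
      (Nat.toDigits 10 (n / 10)).filter oddCharTest ++
        (if n % 10 % 2 = 1 then [Nat.digitChar (n % 10)] else []) := by
  have hd10 : n % 10 < 10 := Nat.mod_lt n (by omega)
  by_cases hbig : 10 ≤ n
  · rw [Nat.toDigits_of_base_le (by omega) hbig, List.filter_append, List.filter_cons,
      List.filter_nil, oddCharTest_digitChar hd10]
    by_cases hodd : n % 10 % 2 = 1
    · rw [if_pos (by simpa using hodd), if_pos hodd]
    · rw [if_neg (by simpa using hodd), if_neg hodd]
  · have h1 : n / 10 = 0 := Nat.div_eq_of_lt (by omega)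
    have h2 : n % 10 = n := Nat.mod_eq_of_lt (by omega)
    rw [h1, h2, toDigits_lt_ten (by omega), List.filter_cons, List.filter_nil,
      oddCharTest_digitChar (by omega)]
    have hz : (Nat.toDigits 10 0).filter oddCharTest = [] := rfl
    rw [hz]
    by_cases hodd : n % 2 = 1
    · simp [hodd]
    · simp [hodd]

-- the loop of B accumulates exactly A's filtered digit list, back-to-front
lemma solveAltLoop_eq (n : Nat) (s : List Char) :
    solveAltLoop (n : Int) s = (Nat.toDigits 10 n).filter oddCharTest ++ s := by
  induction n using Nat.strong_induction_on generalizing s with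
  | _ n ih =>
    rw [solveAltLoop]
    by_cases hn : 0 < (n : Int)
    · rw [dif_pos hn]
      have hmod : PySem.Int.mod (n : Int) 10 = ((n % 10 : Nat) : Int) :=
        PySem.Int.mod_natCast n 10
      have hdiv : PySem.Int.floordiv (n : Int) 10 = ((n / 10 : Nat) : Int) :=
        PySem.Int.floordiv_natCast n 10
      have hm2 : PySem.Int.mod ((n % 10 : Nat) : Int) 2 = ((n % 10 % 2 : Nat) : Int) :=
        PySem.Int.mod_natCast (n % 10) 2
      have hchars : PySem.Int.toChars ((n % 10 : Nat) : Int) = [Nat.digitChar (n % 10)] := by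
        rw [toChars_small (by positivity) (by exact_mod_cast Nat.mod_lt n (by omega))]
        rw [Int.toNat_natCast]
      simp only [hmod, hdiv, hm2, hchars]
      rw [ih (n / 10) (Nat.div_lt_self (by omega) (by omega)),
        filter_toDigits_step n (by omega)]
      by_cases hodd : n % 10 % 2 = 1
      · rw [if_pos (by simp [hodd]), if_pos hodd, List.append_assoc]
      · rw [if_neg (by simp [Nat.mod_two_ne_one.mp hodd]), if_neg hodd, List.append_nil]
    · -- n = 0: the loop returns s, and toDigits 10 0 = ['0'] has no odd character
      have h0 : n = 0 := by omega
      subst h0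
      rw [dif_neg hn]
      rfl

-- str(x) for 0 ≤ x is the decimal digit string of x.toNat
lemma toStr_toList_of_nonneg {x : Int} (h : 0 ≤ x) :
    (PySem.Int.toStr x).toList = Nat.toDigits 10 x.toNat := by
  rw [PySem.Int.toList_toStr, PySem.Int.toChars, if_neg (by omega)]

-- ===== VERDICT (by name: the statement is the Claim_ definition above) =====
theorem solve_spec : Claim_equal_solve := by
  intro x p _ hpre
  obtain ⟨hx, _⟩ := hpre
  unfold Spec_solve solve solve_alt
  have hlist : (PySem.Int.toStr x).toList.filter
      (fun c => decide (PySem.Int.mod ((PySem.Int.ofStr? (String.ofList [c])).getD 0) 2 ≠ 0))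
      = solveAltLoop x [] := by
    have h := solveAltLoop_eq x.toNat []
    rw [Int.toNat_of_nonneg hx] at h
    rw [h, List.append_nil, toStr_toList_of_nonneg hx]
    rfl
  rw [hlist]
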